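-- pv_equiv track=rewrite | github.com/TIIGR/Python-in-SPbAU | funcs_operation/usrfuncs.py | streplace
-- ===== SOURCE A (Python) =====
-- def streplace(func):
--     library = {
--         '^': '**',
--         'fi': '((1 + sqrt(5)) / 2)',
--         'Pf(x)': 'pf(x, 0)'
--     }
--     for i, j in library.items():
--         func = func.replace(i, j)
--     return func
-- ===== SOURCE B (Python) =====
-- def streplace(func):
--     library = [
--         ('^', '**'),
--         ('fi', '((1 + sqrt(5)) / 2)'),
--         ('Pf(x)', 'pf(x, 0)'),
--     ]
--     out = []
--     i = 0
--     n = len(func)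
--     while i < n:
--         for key, val in library:
--             if func.startswith(key, i):
--                 out.append(val)
--                 i += len(key)
--                 break
--         else:
--             out.append(func[i])
--             i += 1
--     return ''.join(out)
-- ===== Notes on version B (the rewrite author's own statement) =====
-- stated objective: alternative
-- what changed: Replaces the three sequential whole-string str.replace passes by a single left-to-right scan that tries each key at the current position and emits its replacement (or the current character) once, building the output in one pass.
import Mathlib
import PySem

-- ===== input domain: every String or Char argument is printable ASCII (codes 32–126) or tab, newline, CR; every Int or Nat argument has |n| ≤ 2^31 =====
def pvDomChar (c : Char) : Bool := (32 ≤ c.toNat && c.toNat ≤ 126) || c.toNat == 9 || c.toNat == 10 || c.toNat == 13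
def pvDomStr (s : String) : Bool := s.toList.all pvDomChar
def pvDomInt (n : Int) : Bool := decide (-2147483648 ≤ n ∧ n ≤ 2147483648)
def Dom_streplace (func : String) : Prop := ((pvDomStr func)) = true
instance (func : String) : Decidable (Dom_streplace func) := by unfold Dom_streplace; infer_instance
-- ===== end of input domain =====

-- B replaces A's three sequential whole-string replace passes by one left-to-right scan
-- that tries each key at the current position and emits its replacement once (alternative decomposition, same cost).

-- ===== PORT A =====
def streplace (func : String) : String :=
  let library : PySem.Dict String String :=
    PySem.Dict.ofList [("^", "**"), ("fi", "((1 + sqrt(5)) / 2)"), ("Pf(x)", "pf(x, 0)")]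
  library.items.foldl (fun f ij => PySem.Str.replace f ij.1 ij.2) func

-- ===== PORT B =====
-- replacement texts of B's table, as char lists
def pvRepFi : List Char :=
  ['(', '(', '1', ' ', '+', ' ', 's', 'q', 'r', 't', '(', '5', ')', ')', ' ', '/', ' ', '2', ')']
def pvRepPf : List Char := ['p', 'f', '(', 'x', ',', ' ', '0', ')']

-- B's while-loop: at each position try the keys in order (startswith), emit the
-- replacement and skip the key, otherwise copy the character.
def streplaceGo : List Char → List Char
  | [] => []
  | c :: t =>
    if List.isPrefixOf ['^'] (c :: t) then
      '*' :: '*' :: streplaceGo t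
    else if List.isPrefixOf ['f', 'i'] (c :: t) then
      pvRepFi ++ streplaceGo (t.drop 1)
    else if List.isPrefixOf ['P', 'f', '(', 'x', ')'] (c :: t) then
      pvRepPf ++ streplaceGo (t.drop 4)
    else
      c :: streplaceGo t
termination_by l => l.length
decreasing_by
  all_goals simp [List.length_drop]

def streplace_alt (func : String) : String := String.ofList (streplaceGo func.toList)

-- ===== PRECONDITION & SPEC =====
def Spec_streplace (func : String) (out : String) : Prop := out = streplace_alt func
instance (func : String) (out : String) : Decidable (Spec_streplace func out) := by unfold Spec_streplace; infer_instance

-- ===== CLAIM (what is proved, stated in full; the proofs are below) =====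
def Claim_equal_streplace : Prop := ∀ (func : String), Dom_streplace func → Spec_streplace func (streplace func)

-- ===== LEMMAS AND PROOFS =====

-- generic facts about PySem.Chars.replace's fuel loop
lemma pv_go_zero (old new l acc : List Char) :
    PySem.Chars.replace.go old new 0 l acc = acc.reverse ++ l := by
  simp [PySem.Chars.replace.go]
lemma pv_go_nil (old new acc : List Char) (fuel : Nat) :
    PySem.Chars.replace.go old new (fuel + 1) [] acc = acc.reverse := by
  simp [PySem.Chars.replace.go]
lemma pv_go_cons (old new l acc : List Char) (c : Char) (fuel : Nat) :
    PySem.Chars.replace.go old new (fuel + 1) (c :: l) acc =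
      if old.isPrefixOf (c :: l) then
        PySem.Chars.replace.go old new fuel (List.drop old.length (c :: l)) (new.reverse ++ acc)
      else
        PySem.Chars.replace.go old new fuel l (c :: acc) := by
  simp [PySem.Chars.replace.go]
lemma pv_go_acc (old new : List Char) :
    ∀ (fuel : Nat) (l acc : List Char),
      PySem.Chars.replace.go old new fuel l acc =
        acc.reverse ++ PySem.Chars.replace.go old new fuel l [] := by
  intro fuel
  induction fuel with
  | zero => intro l acc; simp [pv_go_zero]
  | succ f ih =>
    intro l acc
    cases l with
    | nil => simp [pv_go_nil]
    | cons c t =>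
      rw [pv_go_cons, pv_go_cons]
      split_ifs with h
      · rw [ih _ (new.reverse ++ acc), ih _ (new.reverse ++ [])]; simp
      · rw [ih _ (c :: acc), ih _ (c :: [])]; simp
lemma pv_go_fuel (old new : List Char) (ho : old ≠ []) :
    ∀ (fuel : Nat) (l : List Char), l.length ≤ fuel →
      PySem.Chars.replace.go old new fuel l [] =
        PySem.Chars.replace.go old new l.length l [] := by
  intro fuel
  induction fuel using Nat.strong_induction_on with
  | _ fuel ih =>
    intro l hl
    cases fuel with
    | zero =>
      cases l with
      | nil => rfl
      | cons c t => simp at hl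
    | succ f =>
      cases l with
      | nil => simp [pv_go_nil, pv_go_zero]
      | cons c t =>
        simp only [List.length_cons]
        rw [pv_go_cons, pv_go_cons]
        simp only [List.length_cons] at hl
        split_ifs with hp
        · have hol : 0 < old.length := List.length_pos_of_ne_nil ho
          have hlen : (List.drop old.length (c :: t)).length ≤ t.length := by
            simp [List.length_drop]; omega
          rw [pv_go_acc, pv_go_acc old new t.length]
          congr 1
          rw [ih f (by omega) _ (le_trans hlen (by omega)),
            ih t.length (by omega) _ hlen]
        · rw [pv_go_acc, pv_go_acc old new t.length]
          congr 1
          rw [ih f (by omega) t (by omega), ih t.length (by omega) t le_rfl]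
lemma pv_replace_nil (old new : List Char) (ho : old ≠ []) :
    PySem.Chars.replace [] old new = [] := by
  simp [PySem.Chars.replace, List.isEmpty_iff, ho, pv_go_zero]
lemma pv_replace_cons_neg (old new : List Char) (c : Char) (t : List Char)
    (h : old.isPrefixOf (c :: t) = false) :
    PySem.Chars.replace (c :: t) old new = c :: PySem.Chars.replace t old new := by
  have ho : old ≠ [] := by
    intro e; subst e; simp [List.isPrefixOf] at h
  simp only [PySem.Chars.replace, List.isEmpty_iff, List.length_cons]
  rw [if_neg ho, if_neg ho, pv_go_cons, if_neg (by simp [h]), pv_go_acc]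
  simp
lemma pv_replace_append_self (old new x : List Char) (ho : old ≠ []) :
    PySem.Chars.replace (old ++ x) old new = new ++ PySem.Chars.replace x old new := by
  obtain ⟨o, os, rfl⟩ := List.exists_cons_of_ne_nil ho
  simp only [PySem.Chars.replace, List.isEmpty_iff, List.cons_append, List.length_cons,
    List.length_append]
  rw [if_neg ho, if_neg ho, pv_go_cons, if_pos (by
    rw [← List.cons_append]
    exact List.isPrefixOf_iff_prefix.mpr (List.prefix_append _ _))]
  have hdrop : List.drop (o :: os).length (o :: (os ++ x)) = x := by
    rw [← List.cons_append, List.drop_left]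
  rw [hdrop, pv_go_acc]
  simp only [List.reverse_reverse, List.append_nil]
  congr 1
  rw [pv_go_fuel _ _ ho _ _ (by omega)]


-- the three passes of A, on char lists
def pvR1 (l : List Char) : List Char := PySem.Chars.replace l ['^'] ['*', '*']
def pvR2 (l : List Char) : List Char := PySem.Chars.replace l ['f', 'i'] pvRepFi
def pvR3 (l : List Char) : List Char := PySem.Chars.replace l ['P', 'f', '(', 'x', ')'] pvRepPf
def pvR21 (l : List Char) : List Char := pvR2 (pvR1 l)

lemma pvR1_nil : pvR1 [] = [] := pv_replace_nil _ _ (by simp)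

lemma pvR1_caret (t : List Char) : pvR1 ('^' :: t) = '*' :: '*' :: pvR1 t := by
  have h := pv_replace_append_self ['^'] ['*', '*'] t (by simp)
  simpa [pvR1] using h

lemma pvR1_cons (c : Char) (t : List Char) (h : c ≠ '^') : pvR1 (c :: t) = c :: pvR1 t := by
  apply pv_replace_cons_neg
  simp [List.isPrefixOf, Ne.symm h]

lemma pvR1_head (t : List Char) (d : Char) (h : (pvR1 t).head? = some d) :
    d = '*' ∨ t.head? = some d := by
  cases t with
  | nil => rw [pvR1_nil] at h; simp at h
  | cons c r =>
    by_cases hc : c = '^'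
    · subst hc; rw [pvR1_caret] at h; simp at h; left; exact h.symm
    · rw [pvR1_cons c r hc] at h; simp at h; right; simp [h]

lemma pvR21_nil : pvR21 [] = [] := by
  unfold pvR21 pvR2
  rw [pvR1_nil]
  exact pv_replace_nil ['f', 'i'] pvRepFi (by simp)

lemma pvR21_caret (t : List Char) : pvR21 ('^' :: t) = '*' :: '*' :: pvR21 t := by
  unfold pvR21
  rw [pvR1_caret, pvR2, pv_replace_cons_neg _ _ _ _ (by simp [List.isPrefixOf]),
    pv_replace_cons_neg _ _ _ _ (by simp [List.isPrefixOf])]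
  rfl

lemma pvR21_fi (t : List Char) : pvR21 ('f' :: 'i' :: t) = pvRepFi ++ pvR21 t := by
  unfold pvR21
  rw [pvR1_cons 'f' _ (by decide), pvR1_cons 'i' _ (by decide)]
  have h := pv_replace_append_self ['f', 'i'] pvRepFi (pvR1 t) (by simp)
  simpa [pvR2] using h

lemma pvR21_cons (c : Char) (t : List Char) (h1 : c ≠ '^')
    (h2 : ¬(c = 'f' ∧ t.head? = some 'i')) : pvR21 (c :: t) = c :: pvR21 t := by
  unfold pvR21
  rw [pvR1_cons c t h1]
  apply pv_replace_cons_neg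
  by_cases hc : c = 'f'
  · subst hc
    have hh : (pvR1 t).head? ≠ some 'i' := by
      intro hih
      rcases pvR1_head t 'i' hih with h | h
      · exact absurd h (by decide)
      · exact h2 ⟨rfl, h⟩
    cases hx : pvR1 t with
    | nil => simp [List.isPrefixOf]
    | cons y ys =>
      rw [hx] at hh
      simp only [List.head?_cons, ne_eq, Option.some.injEq] at hh
      simp [List.isPrefixOf, Ne.symm hh]
  · simp [List.isPrefixOf, Ne.symm hc]

lemma pvR21_head (t : List Char) (d : Char) (h : (pvR21 t).head? = some d) :
    d = '*' ∨ d = '(' ∨ t.head? = some d := by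
  cases t with
  | nil => rw [pvR21_nil] at h; simp at h
  | cons c r =>
    by_cases hc : c = '^'
    · subst hc; rw [pvR21_caret] at h; simp at h; left; exact h.symm
    · by_cases hf : c = 'f' ∧ r.head? = some 'i'
      · obtain ⟨hcf, hr⟩ := hf
        subst hcf
        cases r with
        | nil => simp at hr
        | cons y ys =>
          simp only [List.head?_cons, Option.some.injEq] at hr
          subst hr
          rw [pvR21_fi] at h
          simp [pvRepFi] at h
          right; left; exact h.symm
      · rw [pvR21_cons c r hc hf] at h
        simp at h
        right; right; simp [h]

-- prefix-propagation: a key occurrence in A's intermediate strings comes from one in the input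
lemma pvK1 (w : List Char) (h : w.head? ≠ some ')') : ¬ [')'] <+: pvR21 w := by
  intro hp
  have hh : (pvR21 w).head? = some ')' := by
    rcases hp with ⟨s, hs⟩; rw [← hs]; rfl
  rcases pvR21_head w ')' hh with h1 | h1 | h1
  · exact absurd h1 (by decide)
  · exact absurd h1 (by decide)
  · exact h h1

lemma pvK2 (v : List Char) (h : ¬ ['x', ')'] <+: v) : ¬ ['x', ')'] <+: pvR21 v := by
  intro hp
  have hh : (pvR21 v).head? = some 'x' := by
    rcases hp with ⟨s, hs⟩; rw [← hs]; rfl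
  rcases pvR21_head v 'x' hh with h1 | h1 | h1
  · exact absurd h1 (by decide)
  · exact absurd h1 (by decide)
  · cases v with
    | nil => simp at h1
    | cons c w =>
      simp only [List.head?_cons, Option.some.injEq] at h1
      subst h1
      rw [pvR21_cons 'x' w (by decide) (by simp)] at hp
      rw [List.cons_prefix_cons] at hp
      have hw : ¬ [')'] <+: w := by
        intro hq; exact h (by rw [List.cons_prefix_cons]; exact ⟨rfl, hq⟩)
      have hwh : w.head? ≠ some ')' := by
        intro hq
        cases w with
        | nil => simp at hq
        | cons y ys =>
          simp only [List.head?_cons, Option.some.injEq] at hq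
          subst hq
          exact hw ⟨ys, rfl⟩
      exact pvK1 w hwh hp.2

lemma pvK3 (u : List Char) (h : ¬ ['(', 'x', ')'] <+: u) : ¬ ['(', 'x', ')'] <+: pvR21 u := by
  intro hp
  cases u with
  | nil => rw [pvR21_nil] at hp; exact absurd hp (by decide)
  | cons c v =>
    by_cases hc : c = '^'
    · subst hc; rw [pvR21_caret] at hp
      rw [List.cons_prefix_cons] at hp
      exact absurd hp.1 (by decide)
    · by_cases hf : c = 'f' ∧ v.head? = some 'i'
      · obtain ⟨hcf, hv⟩ := hf
        subst hcf
        cases v with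
        | nil => simp at hv
        | cons y ys =>
          simp only [List.head?_cons, Option.some.injEq] at hv
          subst hv
          rw [pvR21_fi] at hp
          simp only [pvRepFi, List.cons_append, List.cons_prefix_cons] at hp
          exact absurd hp.2.1 (by decide)
      · rw [pvR21_cons c v hc hf] at hp
        rw [List.cons_prefix_cons] at hp
        obtain ⟨hcp, hp2⟩ := hp
        subst hcp
        have hv : ¬ ['x', ')'] <+: v := by
          intro hq; exact h (by rw [List.cons_prefix_cons]; exact ⟨rfl, hq⟩)
        exact pvK2 v hv hp2

lemma pvK (t : List Char) (h : ¬ ['f', '(', 'x', ')'] <+: t) :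
    ¬ ['f', '(', 'x', ')'] <+: pvR21 t := by
  intro hp
  cases t with
  | nil => rw [pvR21_nil] at hp; exact absurd hp (by decide)
  | cons c u =>
    by_cases hc : c = '^'
    · subst hc; rw [pvR21_caret] at hp
      rw [List.cons_prefix_cons] at hp
      exact absurd hp.1 (by decide)
    · by_cases hf : c = 'f' ∧ u.head? = some 'i'
      · obtain ⟨hcf, hu⟩ := hf
        subst hcf
        cases u with
        | nil => simp at hu
        | cons y ys =>
          simp only [List.head?_cons, Option.some.injEq] at hu
          subst hu
          rw [pvR21_fi] at hp
          simp only [pvRepFi, List.cons_append, List.cons_prefix_cons] at hp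
          exact absurd hp.1 (by decide)
      · rw [pvR21_cons c u hc hf] at hp
        rw [List.cons_prefix_cons] at hp
        obtain ⟨hcp, hp2⟩ := hp
        subst hcp
        have hu : ¬ ['(', 'x', ')'] <+: u := by
          intro hq; exact h (by rw [List.cons_prefix_cons]; exact ⟨rfl, hq⟩)
        exact pvK3 u hu hp2

lemma pvR3_peel (pre : List Char) (h : 'P' ∉ pre) :
    ∀ x, pvR3 (pre ++ x) = pre ++ pvR3 x := by
  induction pre with
  | nil => intro x; simp
  | cons p ps ih =>
    intro x
    have hp : p ≠ 'P' := fun e => h (e ▸ List.mem_cons_self ..)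
    rw [List.cons_append, pvR3, pv_replace_cons_neg _ _ _ _ (by simp [List.isPrefixOf, Ne.symm hp])]
    rw [← pvR3, ih (fun hm => h (List.mem_cons_of_mem _ hm)) x, List.cons_append]

-- the key lemma: A's three passes equal B's single scan
lemma pv_main : ∀ (n : Nat) (l : List Char), l.length ≤ n → pvR3 (pvR21 l) = streplaceGo l := by
  intro n
  induction n with
  | zero =>
    intro l hl
    have : l = [] := List.eq_nil_of_length_eq_zero (Nat.le_zero.mp hl)
    subst this
    rw [pvR21_nil, pvR3, pv_replace_nil _ _ (by simp), streplaceGo]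
  | succ n ih =>
    intro l hl
    cases l with
    | nil => rw [pvR21_nil, pvR3, pv_replace_nil _ _ (by simp), streplaceGo]
    | cons c t =>
      simp only [List.length_cons, Nat.succ_le_succ_iff] at hl
      by_cases h1 : c = '^'
      · subst h1
        rw [pvR21_caret, pvR3,
          pv_replace_cons_neg _ _ _ _ (by simp [List.isPrefixOf]),
          pv_replace_cons_neg _ _ _ _ (by simp [List.isPrefixOf]), ← pvR3,
          ih t hl, streplaceGo]
        rw [if_pos (by simp [List.isPrefixOf])]
      · by_cases h2 : List.isPrefixOf ['f', 'i'] (c :: t) = true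
        · have hpre := List.isPrefixOf_iff_prefix.mp h2
          rw [List.cons_prefix_cons] at hpre
          obtain ⟨hcf, hpre2⟩ := hpre
          subst hcf
          cases t with
          | nil => exact absurd hpre2 (by decide)
          | cons y ys =>
            rw [List.cons_prefix_cons] at hpre2
            obtain ⟨hyi, _⟩ := hpre2
            subst hyi
            rw [pvR21_fi, pvR3_peel pvRepFi (by decide) _, ih ys (by simp at hl; omega),
              streplaceGo]
            rw [if_neg (by simp [List.isPrefixOf]), if_pos (by simp [List.isPrefixOf])]
            simp
        · by_cases h3 : List.isPrefixOf ['P', 'f', '(', 'x', ')'] (c :: t) = true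
          · have hpre := List.isPrefixOf_iff_prefix.mp h3
            rw [List.cons_prefix_cons] at hpre
            obtain ⟨hcP, hpre2⟩ := hpre
            subst hcP
            obtain ⟨t5, ht⟩ : ∃ t5, t = 'f' :: '(' :: 'x' :: ')' :: t5 := by
              rcases hpre2 with ⟨s, hs⟩
              exact ⟨s, hs.symm⟩
            subst ht
            rw [pvR21_cons 'P' _ (by decide) (by simp),
              pvR21_cons 'f' _ (by decide) (by simp),
              pvR21_cons '(' _ (by decide) (by simp),
              pvR21_cons 'x' _ (by decide) (by simp),
              pvR21_cons ')' _ (by decide) (by simp)]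
            have happ := pv_replace_append_self ['P', 'f', '(', 'x', ')'] pvRepPf (pvR21 t5) (by simp)
            rw [show ('P' :: 'f' :: '(' :: 'x' :: ')' :: pvR21 t5) =
                  ['P', 'f', '(', 'x', ')'] ++ pvR21 t5 from rfl, pvR3, happ, ← pvR3,
              ih t5 (by simp at hl; omega), streplaceGo]
            rw [if_neg (by simp [List.isPrefixOf]), if_neg (by simp [List.isPrefixOf]),
              if_pos (by simp [List.isPrefixOf])]
            simp
          · have h2' : ¬(c = 'f' ∧ t.head? = some 'i') := by
              rintro ⟨hcf, hth⟩
              subst hcf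
              cases t with
              | nil => simp at hth
              | cons y ys =>
                simp only [List.head?_cons, Option.some.injEq] at hth
                subst hth
                exact h2 (by simp [List.isPrefixOf])
            rw [pvR21_cons c t h1 h2']
            have hpf : List.isPrefixOf ['P', 'f', '(', 'x', ')'] (c :: pvR21 t) = false := by
              by_cases hcP : c = 'P'
              · subst hcP
                apply Bool.eq_false_iff.mpr
                intro habs
                have hq := List.isPrefixOf_iff_prefix.mp habs
                rw [List.cons_prefix_cons] at hq
                have ht : ¬ ['f', '(', 'x', ')'] <+: t := by
                  intro hq2
                  exact absurd (by simp [List.isPrefixOf_iff_prefix, hq2] :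
                    List.isPrefixOf ['P', 'f', '(', 'x', ')'] ('P' :: t) = true) (by simp [h3])
                exact pvK t ht hq.2
              · simp [List.isPrefixOf, Ne.symm hcP]
            rw [pvR3, pv_replace_cons_neg _ _ _ _ hpf, ← pvR3, ih t hl, streplaceGo]
            rw [if_neg (by simp [List.isPrefixOf, Ne.symm h1]), if_neg (by simp [h2]),
              if_neg (by simp [h3])]

lemma pv_streplace_eq (func : String) :
    streplace func =
      PySem.Str.replace (PySem.Str.replace (PySem.Str.replace func "^" "**") "fi"
        "((1 + sqrt(5)) / 2)") "Pf(x)" "pf(x, 0)" := rfl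

-- ===== VERDICT (by name: the statement is the Claim_ definition above) =====
theorem streplace_spec : Claim_equal_streplace := by
  intro func _
  unfold Spec_streplace streplace_alt
  rw [pv_streplace_eq]
  apply String.toList_inj.mp
  rw [String.toList_ofList]
  simp only [PySem.Str.toList_replace]
  have h1 : ("^" : String).toList = ['^'] := rfl
  have h2 : ("**" : String).toList = ['*', '*'] := rfl
  have h3 : ("fi" : String).toList = ['f', 'i'] := rfl
  have h4 : ("((1 + sqrt(5)) / 2)" : String).toList = pvRepFi := rfl
  have h5 : ("Pf(x)" : String).toList = ['P', 'f', '(', 'x', ')'] := rfl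
  have h6 : ("pf(x, 0)" : String).toList = pvRepPf := rfl
  rw [h1, h2, h3, h4, h5, h6]
  exact pv_main func.toList.length func.toList (le_refl _)
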